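-- pv_equiv track=rewrite | github.com/Galaktikkon/data-structures-algorithims | all/offline/zad3/zad3.py | divArray
-- ===== SOURCE A (Python) =====
-- def divArray(T):
--
--     output=[]
--     n=len(T)
--     i,j=0,0
--     while i<n:
--         while i<n-1 and len(T[i])==len(T[i+1]):
--             i+=1
--         output.append(T[j:i+1])
--         i+=1
--         j=i
--     return output
-- ===== SOURCE B (Python) =====
-- def divArray(T):
--     if not T:
--         return []
--     output = []
--     group = [T[0]]
--     for x in T[1:]:
--         if len(x) == len(group[-1]):
--             group.append(x)
--         else:
--             output.append(group)
--             group = [x]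
--     output.append(group)
--     return output
-- ===== Notes on version B (the rewrite author's own statement) =====
-- stated objective: simpler
-- what changed: Replaced A's index-based nested while loops with slicing by a single forward pass that builds the current group incrementally and pushes it when the element length changes.
import Mathlib
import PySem

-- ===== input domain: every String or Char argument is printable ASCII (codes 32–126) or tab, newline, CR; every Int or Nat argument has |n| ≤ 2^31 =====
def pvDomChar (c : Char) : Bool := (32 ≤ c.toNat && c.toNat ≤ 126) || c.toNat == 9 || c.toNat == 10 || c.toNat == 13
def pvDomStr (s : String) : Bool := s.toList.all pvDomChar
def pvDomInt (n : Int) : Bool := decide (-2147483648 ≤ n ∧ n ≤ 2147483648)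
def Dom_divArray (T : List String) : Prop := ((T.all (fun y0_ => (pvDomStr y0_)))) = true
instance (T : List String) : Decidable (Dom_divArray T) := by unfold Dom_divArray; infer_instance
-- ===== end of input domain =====

-- B groups consecutive equal-length strings in one forward pass (simpler decomposition); same result as A.

-- ===== PORT A =====
-- inner while loop of A: advance i while i < n-1 and len(T[i]) == len(T[i+1])
def divArrayInner (T : List String) (n i : Nat) : Nat :=
  if h : i < n - 1 ∧ PySem.Str.len (PySem.List.pyGetD T (i : Int) "") = PySem.Str.len (PySem.List.pyGetD T ((i : Int) + 1) "") then
    divArrayInner T n (i + 1)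
  else i
termination_by n - 1 - i
decreasing_by omega

-- outer while loop of A: i, j indices, output accumulator; needs i ≤ divArrayInner for termination
theorem divArrayInner_ge_aux : ∀ (m : Nat) (T : List String) (n i : Nat), n - 1 - i ≤ m → i ≤ divArrayInner T n i := by
  intro m
  induction m with
  | zero =>
    intro T n i hm
    rw [divArrayInner]
    split
    · next h => exact absurd h.1 (by omega)
    · exact Nat.le_refl i
  | succ m ih =>
    intro T n i hm
    rw [divArrayInner]
    split
    · next h => exact Nat.le_trans (by omega) (ih T n (i + 1) (by omega))
    · exact Nat.le_refl i

theorem divArrayInner_ge (T : List String) (n i : Nat) : i ≤ divArrayInner T n i :=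
  divArrayInner_ge_aux (n - 1 - i) T n i (Nat.le_refl _)

def divArrayOuter (T : List String) (n i j : Nat) (output : List (List String)) : List (List String) :=
  if h : i < n then
    let i' := divArrayInner T n i
    divArrayOuter T n (i' + 1) (i' + 1)
      (output ++ [PySem.List.slice T (some (j : Int)) (some ((i' : Int) + 1))])
  else output
termination_by n - i
decreasing_by have := divArrayInner_ge T n i; omega

def divArray (T : List String) : List (List String) :=
  divArrayOuter T T.length 0 0 []

-- ===== PORT B =====
-- loop body of B: extend the current group or push it and start a new one
def divArrayAltStep (s : List (List String) × List String) (x : String) : List (List String) × List String :=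
  if PySem.Str.len x = PySem.Str.len (s.2.getLastD "") then
    (s.1, s.2 ++ [x])
  else
    (s.1 ++ [s.2], [x])

def divArray_alt (T : List String) : List (List String) :=
  match T with
  | [] => []
  | t :: ts =>
    let s := ts.foldl divArrayAltStep ([], [t])
    s.1 ++ [s.2]

-- ===== PRECONDITION & SPEC =====
def Spec_divArray (T : List String) (out : List (List String)) : Prop := out = divArray_alt T
instance (T : List String) (out : List (List String)) : Decidable (Spec_divArray T out) := by unfold Spec_divArray; infer_instance

-- ===== CLAIM (what is proved, stated in full; the proofs are below) =====
def Claim_equal_divArray : Prop := ∀ (T : List String), Dom_divArray T → Spec_divArray T (divArray T)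

-- ===== LEMMAS AND PROOFS =====

-- canonical characterisation: 'run p l' splits l into the maximal prefix chained by equal lengths starting from p, and the rest
def pvRun (p : String) : List String → List String × List String
  | [] => ([], [])
  | x :: xs =>
    if PySem.Str.len x = PySem.Str.len p then
      let r := pvRun x xs
      (x :: r.1, r.2)
    else ([], x :: xs)

theorem pvRun_snd_length (p : String) (l : List String) : (pvRun p l).2.length ≤ l.length := by
  induction l generalizing p with
  | nil => simp [pvRun]
  | cons x xs ih =>
    simp only [pvRun]
    split
    · exact (ih x).trans (by simp)
    · simp

def pvChunk : List String → List (List String)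
  | [] => []
  | x :: xs => (x :: (pvRun x xs).1) :: pvChunk ((pvRun x xs).2)
termination_by l => l.length
decreasing_by have := pvRun_snd_length x xs; simp; omega

theorem pvRun_take_drop (p : String) (l : List String) :
    (pvRun p l).1 = l.take (pvRun p l).1.length ∧ (pvRun p l).2 = l.drop (pvRun p l).1.length := by
  induction l generalizing p with
  | nil => simp [pvRun]
  | cons x xs ih =>
    simp only [pvRun]
    split
    · obtain ⟨h1, h2⟩ := ih x
      constructor
      · simpa using h1
      · simpa using h2
    · simp

-- A's inner loop finds the end of the current run
theorem divArrayInner_run_aux : ∀ (m : Nat) (T : List String) (i : Nat), T.length - i ≤ m → i < T.length →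
    divArrayInner T T.length i = i + (pvRun (T.getD i "") (T.drop (i + 1))).1.length := by
  intro m
  induction m with
  | zero => intro T i hm h; omega
  | succ m ih =>
    intro T i hm h
    rw [divArrayInner]
    split
    · next hc =>
      obtain ⟨hlt, heq⟩ := hc
      have h1 : i + 1 < T.length := by omega
      have hd : T.drop (i + 1) = T.getD (i + 1) "" :: T.drop (i + 1 + 1) := by
        rw [List.getD_eq_getElem _ _ h1, List.drop_eq_getElem_cons h1]
      rw [ih T (i + 1) (by omega) h1, hd]
      simp only [pvRun]
      rw [if_pos]
      · simp
        omega
      · simp only [PySem.List.pyGetD_natCast] at heq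
        have hcast : ((i : Int) + 1) = ((i + 1 : Nat) : Int) := by push_cast; ring
        rw [hcast, PySem.List.pyGetD_natCast] at heq
        exact heq.symm
    · next hc =>
      rcases Nat.lt_or_ge i (T.length - 1) with hlt | hge
      · have h1 : i + 1 < T.length := by omega
        have hd : T.drop (i + 1) = T.getD (i + 1) "" :: T.drop (i + 1 + 1) := by
          rw [List.getD_eq_getElem _ _ h1, List.drop_eq_getElem_cons h1]
        rw [hd]
        simp only [pvRun]
        rw [if_neg]
        · simp
        · intro hcon
          apply hc
          refine ⟨hlt, ?_⟩
          simp only [PySem.List.pyGetD_natCast]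
          have hcast : ((i : Int) + 1) = ((i + 1 : Nat) : Int) := by push_cast; ring
          rw [hcast, PySem.List.pyGetD_natCast]
          exact hcon.symm
      · have hnil : T.drop (i + 1) = [] := by
          apply List.drop_eq_nil_of_le; omega
        rw [hnil]
        simp [pvRun]

theorem divArrayInner_run (T : List String) (i : Nat) (h : i < T.length) :
    divArrayInner T T.length i = i + (pvRun (T.getD i "") (T.drop (i + 1))).1.length :=
  divArrayInner_run_aux (T.length - i) T i (Nat.le_refl _) h

-- A's outer loop produces the chunks of the remaining suffix
theorem divArrayOuter_chunk_aux : ∀ (m : Nat) (T : List String) (i : Nat) (out : List (List String)),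
    T.length - i ≤ m → divArrayOuter T T.length i i out = out ++ pvChunk (T.drop i) := by
  intro m
  induction m with
  | zero =>
    intro T i out hm
    rw [divArrayOuter]
    split
    · next h => omega
    · next h =>
      have : T.drop i = [] := by apply List.drop_eq_nil_of_le; omega
      rw [this]
      simp [pvChunk]
  | succ m ih =>
    intro T i out hm
    rw [divArrayOuter]
    split
    · next h =>
      have hrun := divArrayInner_run T i h
      set p := T.getD i "" with hp
      set k := (pvRun p (T.drop (i + 1))).1.length with hk
      set i' := divArrayInner T T.length i with hi'def
      have hi' : i' = i + k := hrun
      obtain ⟨hr1, hr2⟩ := pvRun_take_drop p (T.drop (i + 1))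
      have hklen : k ≤ (T.drop (i + 1)).length := by
        have hlen := congrArg List.length hr1
        rw [List.length_take] at hlen
        omega
      have hdi : T.drop i = p :: T.drop (i + 1) := by
        rw [hp, List.getD_eq_getElem _ _ h, List.drop_eq_getElem_cons h]
      have hslice : PySem.List.slice T (some (i : Int)) (some ((i' : Int) + 1)) =
          p :: (pvRun p (T.drop (i + 1))).1 := by
        have hcast : ((i' : Int) + 1) = (((i' + 1 : Nat)) : Int) := by push_cast; ring
        rw [hcast, PySem.List.slice_natCast]
        have htk : i' + 1 - i = k + 1 := by omega
        rw [htk, hdi, List.take_succ_cons]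
        congr 1
        rw [hr1, ← hk]
      have hdrop : T.drop (i' + 1) = (pvRun p (T.drop (i + 1))).2 := by
        rw [hr2, ← hk, List.drop_drop]
        congr 1
        omega
      rw [ih T (i' + 1) _ (by omega), hslice]
      conv_rhs => rw [hdi]
      simp only [pvChunk]
      rw [hdrop]
      simp
    · next h =>
      have : T.drop i = [] := by apply List.drop_eq_nil_of_le; omega
      rw [this]
      simp [pvChunk]

-- B's grouping as a recursive function on the remaining input
def pvChunkFrom (p : String) (cur : List String) : List String → List (List String)
  | [] => [cur]
  | x :: xs =>
    if PySem.Str.len x = PySem.Str.len p then pvChunkFrom x (cur ++ [x]) xs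
    else cur :: pvChunkFrom x [x] xs

theorem divArray_alt_fold (rest : List String) (out : List (List String)) (cur : List String)
    (p : String) (hp : cur.getLastD "" = p) :
    (rest.foldl divArrayAltStep (out, cur)).1 ++ [(rest.foldl divArrayAltStep (out, cur)).2] =
      out ++ pvChunkFrom p cur rest := by
  induction rest generalizing out cur p with
  | nil => simp [pvChunkFrom]
  | cons x xs ih =>
    simp only [List.foldl_cons, divArrayAltStep, hp, pvChunkFrom]
    split
    · exact ih out (cur ++ [x]) x (by simp)
    · rw [ih (out ++ [cur]) [x] x (by simp)]
      simp

theorem pvChunkFrom_chunk (l : List String) (p : String) (cur : List String) :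
    pvChunkFrom p cur l = (cur ++ (pvRun p l).1) :: pvChunk ((pvRun p l).2) := by
  induction l generalizing p cur with
  | nil => simp [pvChunkFrom, pvRun, pvChunk]
  | cons x xs ih =>
    simp only [pvChunkFrom, pvRun]
    split
    · rw [ih x (cur ++ [x])]
      simp
    · rw [ih x [x]]
      conv_rhs => simp only [pvChunk]
      simp [*]

theorem divArray_alt_chunk (T : List String) : divArray_alt T = pvChunk T := by
  cases T with
  | nil => simp [divArray_alt, pvChunk]
  | cons t ts =>
    simp only [divArray_alt]
    rw [divArray_alt_fold ts [] [t] t (by simp), pvChunkFrom_chunk]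
    simp only [pvChunk]
    simp

-- ===== VERDICT (by name: the statement is the Claim_ definition above) =====
theorem divArray_spec : Claim_equal_divArray := by
  intro T _
  unfold Spec_divArray divArray
  rw [divArrayOuter_chunk_aux T.length T 0 [] (by omega), divArray_alt_chunk]
  simp
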